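-- pv_equiv track=rewrite | github.com/lockezhan/Prometheus | memoryBound.py | extract_operation
-- ===== SOURCE A (Python) =====
-- def extract_operation(statement):
--     op = []
--     inside_bracket = False
--     for s in statement:
--         if s == "[":
--             inside_bracket = True
--         if s == "]":
--             inside_bracket = False
--         if not inside_bracket:
--             if s in ["+", "-", "*", "/"]:
--                 op.append(s)
--     return op
-- ===== SOURCE B (Python) =====
-- def extract_operation(statement):
--     op = []
--     i = 0
--     n = len(statement)
--     while i < n:
--         if statement[i] == '[':
--             j = statement.find(']', i + 1)
--             if j == -1:
--                 break
--             i = j + 1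
--         else:
--             if statement[i] in '+-*/':
--                 op.append(statement[i])
--             i += 1
--     return op
-- ===== Notes on version B (the rewrite author's own statement) =====
-- stated objective: alternative
-- what changed: Replaced the per-character inside_bracket flag state machine with a skip-ahead scan that, on '[', jumps directly past the next ']' via str.find (stopping at an unmatched '['), so no boolean state is threaded through the loop.
import Mathlib
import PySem

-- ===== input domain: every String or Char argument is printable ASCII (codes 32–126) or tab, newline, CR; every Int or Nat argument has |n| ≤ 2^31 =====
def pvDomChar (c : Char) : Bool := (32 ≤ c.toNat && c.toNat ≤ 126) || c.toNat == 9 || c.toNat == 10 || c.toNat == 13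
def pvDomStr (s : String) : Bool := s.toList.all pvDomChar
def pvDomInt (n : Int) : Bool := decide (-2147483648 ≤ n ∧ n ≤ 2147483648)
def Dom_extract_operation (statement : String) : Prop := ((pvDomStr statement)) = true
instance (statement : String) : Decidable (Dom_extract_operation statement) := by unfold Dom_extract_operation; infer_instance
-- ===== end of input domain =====

-- B replaces A's inside_bracket flag machine with a skip-ahead scan (jump past the next ']' on '['); same O(n) cost, no boolean state.

-- ===== PORT A =====
-- one loop step of A: update inside_bracket, then maybe append the operator
def pvStepA (st : List String × Bool) (s : Char) : List String × Bool :=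
  let inside := if s = '[' then true else st.2
  let inside := if s = ']' then false else inside
  if ¬ inside then
    if s = '+' ∨ s = '-' ∨ s = '*' ∨ s = '/' then (st.1 ++ [s.toString], inside)
    else (st.1, inside)
  else (st.1, inside)

def extract_operation (statement : String) : List String :=
  (statement.toList.foldl pvStepA ([], false)).1

-- ===== PORT B =====
-- Source B's `statement.find(']', i+1)`: the suffix just after the first ']', or none
def pvAfterBracket : List Char → Option (List Char)
  | [] => none
  | c :: rest => if c = ']' then some rest else pvAfterBracket rest

lemma pvAfterBracket_length : ∀ (cs r : List Char), pvAfterBracket cs = some r → r.length < cs.length := by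
  intro cs
  induction cs with
  | nil => intro r h; simp [pvAfterBracket] at h
  | cons c rest ih =>
    intro r h
    simp only [pvAfterBracket] at h
    split at h
    · cases h; simp
    · exact Nat.lt_succ_of_lt (ih r h)

-- Source B's while loop as recursion on the remaining characters
def pvGoB : List Char → List String
  | [] => []
  | c :: rest =>
    if c = '[' then
      match h : pvAfterBracket rest with
      | none => []
      | some r => pvGoB r
    else
      (if c = '+' ∨ c = '-' ∨ c = '*' ∨ c = '/' then [c.toString] else []) ++ pvGoB rest
termination_by cs => cs.length
decreasing_by
  · exact Nat.lt_succ_of_lt (pvAfterBracket_length _ _ h)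
  · simp

def extract_operation_alt (statement : String) : List String :=
  pvGoB statement.toList

-- ===== PRECONDITION & SPEC =====
def Spec_extract_operation (statement : String) (out : List String) : Prop := out = extract_operation_alt statement
instance (statement : String) (out : List String) : Decidable (Spec_extract_operation statement out) := by unfold Spec_extract_operation; infer_instance

-- ===== CLAIM (what is proved, stated in full; the proofs are below) =====
def Claim_equal_extract_operation : Prop := ∀ (statement : String), Dom_extract_operation statement → Spec_extract_operation statement (extract_operation statement)

-- ===== LEMMAS AND PROOFS =====

-- simultaneous invariant: A's fold from inside=false computes pvGoB; from inside=true it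
-- computes pvGoB of the suffix after the next ']' (nothing if there is none).
lemma pvMain : ∀ (cs : List Char) (acc : List String),
    (cs.foldl pvStepA (acc, false)).1 = acc ++ pvGoB cs ∧
    (cs.foldl pvStepA (acc, true)).1 =
      acc ++ (match pvAfterBracket cs with | none => [] | some r => pvGoB r) := by
  intro cs
  induction cs with
  | nil => intro acc; simp [pvGoB, pvAfterBracket]
  | cons c rest ih =>
    intro acc
    constructor
    · by_cases hb : c = '['
      · subst hb
        have : pvStepA (acc, false) '[' = (acc, true) := by simp [pvStepA]
        simp only [List.foldl_cons, this, (ih acc).2, pvGoB]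
        simp only [reduceIte]
        cases hr : pvAfterBracket rest <;> simp
      · by_cases hc : c = ']'
        · subst hc
          have : pvStepA (acc, false) ']' = (acc, false) := by simp [pvStepA]
          simp only [List.foldl_cons, this, (ih acc).1, pvGoB]
          simp
        · by_cases hop : c = '+' ∨ c = '-' ∨ c = '*' ∨ c = '/'
          · have : pvStepA (acc, false) c = (acc ++ [c.toString], false) := by
              simp [pvStepA, hb, hc, hop]
            simp only [List.foldl_cons, this, (ih (acc ++ [c.toString])).1, pvGoB]
            simp [hb, hop]
          · have : pvStepA (acc, false) c = (acc, false) := by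
              simp [pvStepA, hb, hc, hop]
            simp only [List.foldl_cons, this, (ih acc).1, pvGoB]
            simp [hb, hop]
    · by_cases hc : c = ']'
      · subst hc
        have : pvStepA (acc, true) ']' = (acc, false) := by simp [pvStepA]
        simp only [List.foldl_cons, this, (ih acc).1, pvAfterBracket]
        simp
      · have : pvStepA (acc, true) c = (acc, true) := by
          simp [pvStepA, hc]
        simp only [List.foldl_cons, this, (ih acc).2, pvAfterBracket]
        simp [hc]

-- ===== VERDICT (by name: the statement is the Claim_ definition above) =====
theorem extract_operation_spec : Claim_equal_extract_operation := by
  intro statement _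
  unfold Spec_extract_operation extract_operation extract_operation_alt
  simpa using (pvMain statement.toList []).1
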